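-- pv_equiv track=rewrite | github.com/emirkacar/PythonileYapilanTemelAlgoritmalar | PYTHON_TEMEL_PROJECTS/tek_sayilarin_siralanmasi.py | algoritma
-- ===== SOURCE A (Python) =====
-- def algoritma(l):
--     n=len(l)
--     for i in range(n):
--         for j in range(i+1,n):
--             if(l[i]%2==1 and l[j]%2==1):
--                 if(l[i] > l[j]):
--                     l[i],l[j] = l[j],l[i]
--     return l
-- ===== SOURCE B (Python) =====
-- def algoritma(l):
--     odds = sorted(x for x in l if x % 2 == 1)
--     k = 0
--     for i in range(len(l)):
--         if l[i] % 2 == 1: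
--             l[i] = odds[k]
--             k += 1
--     return l
-- ===== Notes on version B (the rewrite author's own statement) =====
-- stated objective: faster
-- what changed: A repeatedly compare-swaps odd pairs with a quadratic double loop; B collects the odd values, sorts them once, and rewrites the odd positions in a single linear pass.
import Mathlib
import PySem

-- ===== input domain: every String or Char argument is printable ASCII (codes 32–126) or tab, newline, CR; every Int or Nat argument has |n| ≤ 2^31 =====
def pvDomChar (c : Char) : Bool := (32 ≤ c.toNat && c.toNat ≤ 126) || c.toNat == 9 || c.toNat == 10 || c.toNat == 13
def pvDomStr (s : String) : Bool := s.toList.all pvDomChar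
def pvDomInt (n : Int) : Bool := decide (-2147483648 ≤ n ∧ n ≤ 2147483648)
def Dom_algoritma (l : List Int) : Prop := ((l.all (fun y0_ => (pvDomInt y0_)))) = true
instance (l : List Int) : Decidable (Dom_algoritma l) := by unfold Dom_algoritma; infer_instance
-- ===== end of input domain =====

-- B sorts the odd values once and rewrites odd slots in one pass instead of A's quadratic
-- pairwise compare-swap; both Pythons mutate l in place and end with the same list, the
-- theorem is about the returned value.

-- ===== PORT A =====
-- loop body of A's double loop: if l[i]%2==1 and l[j]%2==1 and l[i]>l[j], swap l[i],l[j]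
def pvStepA (l : List Int) (i j : Int) : List Int :=
  if PySem.Int.mod (PySem.List.pyGetD l i 0) 2 = 1 ∧ PySem.Int.mod (PySem.List.pyGetD l j 0) 2 = 1 then
    if PySem.List.pyGetD l i 0 > PySem.List.pyGetD l j 0 then
      PySem.List.pySetD (PySem.List.pySetD l i (PySem.List.pyGetD l j 0)) j (PySem.List.pyGetD l i 0)
    else l
  else l

def algoritma (l : List Int) : List Int :=
  let n : Int := PySem.List.len l
  (PySem.List.pyRange 0 n 1).foldl (fun acc i =>
    (PySem.List.pyRange (i + 1) n 1).foldl (fun acc2 j => pvStepA acc2 i j) acc) l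

-- ===== PORT B =====
-- the single rewrite pass: walk l, replacing each odd element by the next sorted odd value
def pvFill : List Int → List Int → List Int
  | [], _ => []
  | x :: xs, odds =>
    if PySem.Int.mod x 2 = 1 then
      match odds with
      | o :: os => o :: pvFill xs os
      | [] => x :: pvFill xs []    -- never reached: odds holds exactly the odd values of l
    else x :: pvFill xs odds

def algoritma_alt (l : List Int) : List Int :=
  pvFill l (PySem.List.sorted (l.filter (fun x => decide (PySem.Int.mod x 2 = 1))) (fun x => x) false)

-- ===== PRECONDITION & SPEC =====
def Spec_algoritma (l : List Int) (out : List Int) : Prop := out = algoritma_alt l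
instance (l : List Int) (out : List Int) : Decidable (Spec_algoritma l out) := by unfold Spec_algoritma; infer_instance

-- ===== CLAIM (what is proved, stated in full; the proofs are below) =====
def Claim_equal_algoritma : Prop := ∀ (l : List Int), Dom_algoritma l → Spec_algoritma l (algoritma l)

-- ===== LEMMAS AND PROOFS =====

-- A's inner loop, written as a recursion: scan ys keeping the current value a at position i;
-- returns the final value at position i and the rewritten ys.
def pvSelOne : Int → List Int → Int × List Int
  | a, [] => (a, [])
  | a, y :: ys =>
    if PySem.Int.mod y 2 = 1 ∧ a > y then
      ((pvSelOne y ys).1, a :: (pvSelOne y ys).2)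
    else
      ((pvSelOne a ys).1, y :: (pvSelOne a ys).2)

theorem pvSelOne_len (a : Int) (ys : List Int) : (pvSelOne a ys).2.length = ys.length := by
  induction ys generalizing a with
  | nil => rfl
  | cons y ys ih => simp only [pvSelOne]; split <;> simp [ih]

-- A's outer loop as a recursion on the remaining suffix
def pvExSort : List Int → List Int
  | [] => []
  | x :: xs =>
    if PySem.Int.mod x 2 = 1 then
      (pvSelOne x xs).1 :: pvExSort (pvSelOne x xs).2
    else x :: pvExSort xs
termination_by l => l.length
decreasing_by
  · simp [pvSelOne_len]
  · simp

theorem pvGetAt (p rest : List Int) (a : Int) (i : Int) (h : i = (p.length : Int)) :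
    PySem.List.pyGetD (p ++ a :: rest) i 0 = a := by
  subst h
  simp [PySem.List.pyGetD_natCast, List.getD]

theorem pvSetAt (p rest : List Int) (a v : Int) (i : Int) (h : i = (p.length : Int)) :
    PySem.List.pySetD (p ++ a :: rest) i v = p ++ v :: rest := by
  subst h
  rw [PySem.List.pySetD_natCast]
  induction p with
  | nil => rfl
  | cons q qs ih => simp [ih]

-- A's inner loop never changes the list when the pivot value is even
theorem pvInner_even (js : List Int) (p rest : List Int) (a : Int) (i : Int)
    (hi : i = (p.length : Int)) (ha : ¬ PySem.Int.mod a 2 = 1) :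
    js.foldl (fun a2 j => pvStepA a2 i j) (p ++ a :: rest) = p ++ a :: rest := by
  induction js with
  | nil => rfl
  | cons j js ih =>
    have hstep : pvStepA (p ++ a :: rest) i j = p ++ a :: rest := by
      unfold pvStepA
      rw [pvGetAt p rest a i hi, if_neg (fun h => ha h.1)]
    simp only [List.foldl_cons, hstep, ih]

-- A's inner loop, with the pivot odd, computes pvSelOne on the suffix beyond mid
theorem pvInner_odd (ys : List Int) (p mid : List Int) (a : Int) (j N : Int)
    (hj : j = ((p.length : Int)) + 1 + (mid.length : Int)) (hN : N = j + (ys.length : Int))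
    (ha : PySem.Int.mod a 2 = 1) :
    (PySem.List.pyRange j N 1).foldl (fun a2 jj => pvStepA a2 ((p.length : Int)) jj)
        (p ++ a :: (mid ++ ys))
      = p ++ (pvSelOne a ys).1 :: (mid ++ (pvSelOne a ys).2) := by
  induction ys generalizing mid a j N with
  | nil =>
    rw [PySem.List.pyRange_one_eq_nil
      (by simp only [List.length_nil, Nat.cast_zero] at hN; omega)]
    simp [pvSelOne]
  | cons y ys ih =>
    have hjN : j < N := by simp at hN; omega
    rw [PySem.List.pyRange_one_cons hjN, List.foldl_cons]
    have hshape : p ++ a :: (mid ++ (y :: ys)) = (p ++ a :: mid) ++ (y :: ys) := by simp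
    have hjlen : j = (((p ++ a :: mid).length : Nat) : Int) := by simp [hj]; omega
    have hgi : PySem.List.pyGetD (p ++ a :: (mid ++ (y :: ys))) ((p.length : Int)) 0 = a :=
      pvGetAt p (mid ++ (y :: ys)) a _ rfl
    have hgj : PySem.List.pyGetD (p ++ a :: (mid ++ (y :: ys))) j 0 = y := by
      rw [hshape]; exact pvGetAt (p ++ a :: mid) ys y j hjlen
    by_cases hc : PySem.Int.mod y 2 = 1 ∧ a > y
    · -- swap happens
      have hstep : pvStepA (p ++ a :: (mid ++ (y :: ys))) ((p.length : Int)) j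
          = p ++ y :: ((mid ++ [a]) ++ ys) := by
        unfold pvStepA
        rw [hgi, hgj, if_pos ⟨ha, hc.1⟩, if_pos hc.2]
        rw [pvSetAt p (mid ++ (y :: ys)) a y _ rfl]
        have hshape2 : p ++ y :: (mid ++ (y :: ys)) = (p ++ y :: mid) ++ (y :: ys) := by simp
        have hjlen2 : j = (((p ++ y :: mid).length : Nat) : Int) := by simp [hj]; omega
        rw [hshape2, pvSetAt (p ++ y :: mid) ys y a j hjlen2]
        simp
      rw [hstep]
      have := ih (mid ++ [a]) y (j + 1) N (by simp [hj]; omega) (by simp at hN ⊢; omega) hc.1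
      rw [this]
      simp only [pvSelOne, if_pos hc]
      simp
    · -- no swap
      have hstep : pvStepA (p ++ a :: (mid ++ (y :: ys))) ((p.length : Int)) j
          = p ++ a :: (mid ++ (y :: ys)) := by
        unfold pvStepA
        rw [hgi, hgj]
        by_cases hy : PySem.Int.mod y 2 = 1
        · have hay : ¬ a > y := fun h => hc ⟨hy, h⟩
          rw [if_pos ⟨ha, hy⟩, if_neg hay]
        · rw [if_neg (fun h => hy h.2)]
      rw [hstep]
      have hshape3 : p ++ a :: (mid ++ (y :: ys)) = p ++ a :: ((mid ++ [y]) ++ ys) := by simp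
      rw [hshape3]
      have := ih (mid ++ [y]) a (j + 1) N (by simp [hj]; omega) (by simp at hN ⊢; omega) ha
      rw [this]
      simp only [pvSelOne, if_neg hc]
      simp

-- A's outer loop computes pvExSort on the suffix
theorem pvOuter (n : Nat) : ∀ (l p : List Int), l.length = n → ∀ (N i0 : Int),
    N = ((p.length + l.length : Nat) : Int) → i0 = (p.length : Int) →
    (PySem.List.pyRange i0 N 1).foldl
      (fun acc i => (PySem.List.pyRange (i + 1) N 1).foldl (fun a2 j => pvStepA a2 i j) acc)
      (p ++ l)
    = p ++ pvExSort l := by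
  induction n with
  | zero =>
    intro l p hl N i0 hN hi0
    have : l = [] := List.eq_nil_of_length_eq_zero hl
    subst this
    rw [PySem.List.pyRange_one_eq_nil (by simp at hN; omega)]
    simp [pvExSort]
  | succ n ih =>
    intro l p hl N i0 hN hi0
    match l, hl with
    | x :: xs, hl =>
      have hxs : xs.length = n := by simpa using hl
      have hlt : i0 < N := by simp at hN; omega
      rw [PySem.List.pyRange_one_cons hlt, List.foldl_cons]
      by_cases hx : PySem.Int.mod x 2 = 1
      · have hinner := pvInner_odd xs p [] x (i0 + 1) N (by simp [hi0]) (by simp at hN ⊢; omega) hx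
        simp only [List.nil_append] at hinner
        subst hi0
        rw [hinner]
        have hmt : p ++ (pvSelOne x xs).1 :: (pvSelOne x xs).2
            = (p ++ [(pvSelOne x xs).1]) ++ (pvSelOne x xs).2 := by simp
        rw [hmt]
        have := ih (pvSelOne x xs).2 (p ++ [(pvSelOne x xs).1])
          (by simp [pvSelOne_len, hxs]) N ((p.length : Int) + 1)
          (by simp [pvSelOne_len]; simp at hN; omega) (by simp)
        rw [this]
        simp only [pvExSort]
        rw [if_pos hx]
        simp
      · subst hi0
        rw [pvInner_even _ p xs x _ rfl hx]
        have hmt : p ++ x :: xs = (p ++ [x]) ++ xs := by simp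
        rw [hmt]
        have := ih xs (p ++ [x]) hxs N ((p.length : Int) + 1)
          (by simp; simp at hN; omega) (by simp)
        rw [this]
        simp only [pvExSort]
        rw [if_neg hx]
        simp

theorem algoritma_eq_exSort (l : List Int) : algoritma l = pvExSort l := by
  have := pvOuter l.length l [] rfl ((l.length : Nat) : Int) 0 (by simp) (by simp)
  simpa [algoritma] using this

-- parity-and-even-values relation preserved by A
def pvR (a b : Int) : Prop :=
  (PySem.Int.mod a 2 = 1 ↔ PySem.Int.mod b 2 = 1) ∧ (¬ PySem.Int.mod b 2 = 1 → a = b)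

theorem pvR_refl (a : Int) : pvR a a := ⟨Iff.rfl, fun _ => rfl⟩

theorem pvFa_trans {u v w : List Int} (h1 : List.Forall₂ pvR u v) (h2 : List.Forall₂ pvR v w) :
    List.Forall₂ pvR u w := by
  induction h1 generalizing w with
  | nil => cases h2; exact List.Forall₂.nil
  | cons hab h ih =>
    cases h2 with
    | cons hbc h2 =>
      exact List.Forall₂.cons
        ⟨hab.1.trans hbc.1, fun hw => (hab.2 (fun hv => hw (hbc.1.mp hv))).trans (hbc.2 hw)⟩
        (ih h2)

theorem pvSelOne_odd (a : Int) (ys : List Int) (ha : PySem.Int.mod a 2 = 1) :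
    PySem.Int.mod (pvSelOne a ys).1 2 = 1 := by
  induction ys generalizing a with
  | nil => exact ha
  | cons y ys ih =>
    simp only [pvSelOne]
    split
    · exact ih y (by rename_i h; exact h.1)
    · exact ih a ha

theorem pvSelOne_fa2 (a : Int) (ys : List Int) (ha : PySem.Int.mod a 2 = 1) :
    List.Forall₂ pvR (pvSelOne a ys).2 ys := by
  induction ys generalizing a with
  | nil => exact List.Forall₂.nil
  | cons y ys ih =>
    simp only [pvSelOne]
    split
    · rename_i h
      exact List.Forall₂.cons ⟨iff_of_true ha h.1, fun hy => absurd h.1 hy⟩ (ih y h.1)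
    · exact List.Forall₂.cons (pvR_refl y) (ih a ha)

theorem pvExSort_fa (n : Nat) : ∀ l : List Int, l.length = n →
    List.Forall₂ pvR (pvExSort l) l := by
  induction n with
  | zero =>
    intro l hl
    have : l = [] := List.eq_nil_of_length_eq_zero hl
    subst this; simp [pvExSort]
  | succ n ih =>
    intro l hl
    match l, hl with
    | x :: xs, hl =>
      have hxs : xs.length = n := by simpa using hl
      by_cases hx : PySem.Int.mod x 2 = 1
      · simp only [pvExSort, if_pos hx]
        refine List.Forall₂.cons ⟨iff_of_true (pvSelOne_odd x xs hx) hx, fun h => absurd hx h⟩ ?_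
        exact pvFa_trans (ih _ (by simp [pvSelOne_len, hxs])) (pvSelOne_fa2 x xs hx)
      · simp only [pvExSort, if_neg hx]
        exact List.Forall₂.cons (pvR_refl x) (ih xs hxs)

theorem pvSelOne_perm (a : Int) (ys : List Int) :
    ((pvSelOne a ys).1 :: (pvSelOne a ys).2).Perm (a :: ys) := by
  induction ys generalizing a with
  | nil => exact List.Perm.refl _
  | cons y ys ih =>
    simp only [pvSelOne]
    split
    · exact (List.Perm.swap a (pvSelOne y ys).1 (pvSelOne y ys).2).trans ((ih y).cons a)
    · exact (List.Perm.swap y (pvSelOne a ys).1 (pvSelOne a ys).2).trans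
        (((ih a).cons y).trans (List.Perm.swap a y ys))

theorem pvExSort_perm (n : Nat) : ∀ l : List Int, l.length = n → (pvExSort l).Perm l := by
  induction n with
  | zero =>
    intro l hl
    have : l = [] := List.eq_nil_of_length_eq_zero hl
    subst this; simp [pvExSort]
  | succ n ih =>
    intro l hl
    match l, hl with
    | x :: xs, hl =>
      have hxs : xs.length = n := by simpa using hl
      by_cases hx : PySem.Int.mod x 2 = 1
      · simp only [pvExSort, if_pos hx]
        exact ((ih _ (by simp [pvSelOne_len, hxs])).cons _).trans (pvSelOne_perm x xs)
      · simp only [pvExSort, if_neg hx]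
        exact (ih xs hxs).cons x

theorem pvSelOne_min (a : Int) (ys : List Int) :
    (pvSelOne a ys).1 ≤ a ∧
      ∀ z ∈ (pvSelOne a ys).2, PySem.Int.mod z 2 = 1 → (pvSelOne a ys).1 ≤ z := by
  induction ys generalizing a with
  | nil => exact ⟨le_refl a, by simp [pvSelOne]⟩
  | cons y ys ih =>
    simp only [pvSelOne]
    split
    · rename_i h
      refine ⟨le_trans (ih y).1 (le_of_lt h.2), ?_⟩
      intro z hz hzodd
      rcases List.mem_cons.mp hz with rfl | hz
      · exact le_trans (ih y).1 (le_of_lt h.2)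
      · exact (ih y).2 z hz hzodd
    · rename_i h
      refine ⟨(ih a).1, ?_⟩
      intro z hz hzodd
      rcases List.mem_cons.mp hz with rfl | hz
      · have : ¬ a > z := fun hgt => h ⟨hzodd, hgt⟩
        exact le_trans (ih a).1 (le_of_not_gt this)
      · exact (ih a).2 z hz hzodd

theorem pvExSort_sortedOdds (n : Nat) : ∀ l : List Int, l.length = n →
    ((pvExSort l).filter (fun x => decide (PySem.Int.mod x 2 = 1))).Pairwise (· ≤ ·) := by
  induction n with
  | zero =>
    intro l hl
    have : l = [] := List.eq_nil_of_length_eq_zero hl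
    subst this; simp [pvExSort]
  | succ n ih =>
    intro l hl
    match l, hl with
    | x :: xs, hl =>
      have hxs : xs.length = n := by simpa using hl
      by_cases hx : PySem.Int.mod x 2 = 1
      · simp only [pvExSort, if_pos hx]
        rw [List.filter_cons_of_pos (by simp only [decide_eq_true_eq]; exact pvSelOne_odd x xs hx)]
        refine List.Pairwise.cons ?_ (ih _ (by simp [pvSelOne_len, hxs]))
        intro z hz
        have hz' := List.mem_filter.mp hz
        have hzmem : z ∈ (pvSelOne x xs).2 :=
          (pvExSort_perm _ _ (rfl)).mem_iff.mp hz'.1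
        exact (pvSelOne_min x xs).2 z hzmem (by simpa using hz'.2)
      · simp only [pvExSort, if_neg hx]
        rw [List.filter_cons_of_neg (by simp only [decide_eq_true_eq]; exact hx)]
        exact ih xs hxs

theorem pvFill_eq (z l : List Int) (h : List.Forall₂ pvR z l) :
    z = pvFill l (z.filter (fun x => decide (PySem.Int.mod x 2 = 1))) := by
  induction h with
  | nil => rfl
  | cons hab h ih =>
    rename_i a b zs ls
    by_cases hb : PySem.Int.mod b 2 = 1
    · have ha : PySem.Int.mod a 2 = 1 := hab.1.mpr hb
      rw [List.filter_cons_of_pos (by simp only [decide_eq_true_eq]; exact ha)]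
      simp only [pvFill, if_pos hb]
      rw [← ih]
    · have hb' : a = b := hab.2 hb
      have ha : ¬ PySem.Int.mod a 2 = 1 := by rw [hb']; exact hb
      rw [List.filter_cons_of_neg (by simp only [decide_eq_true_eq]; exact ha)]
      simp only [pvFill, if_neg hb]
      rw [← ih, hb']

theorem pv_main (l : List Int) : algoritma l = algoritma_alt l := by
  rw [algoritma_eq_exSort]
  have hsorted : PySem.List.sorted (l.filter (fun x => decide (PySem.Int.mod x 2 = 1)))
      (fun x => x) false
      = (pvExSort l).filter (fun x => decide (PySem.Int.mod x 2 = 1)) :=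
    PySem.List.sorted_id_eq_of_perm_of_pairwise _ _
      ((pvExSort_perm l.length l rfl).filter _)
      (pvExSort_sortedOdds l.length l rfl)
  unfold algoritma_alt
  rw [hsorted]
  exact pvFill_eq (pvExSort l) l (pvExSort_fa l.length l rfl)

-- ===== VERDICT (by name: the statement is the Claim_ definition above) =====
theorem algoritma_spec : Claim_equal_algoritma := by
  intro l _
  unfold Spec_algoritma
  exact pv_main l
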